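-- pv_equiv track=rewrite | github.com/haddocking/shape-restrained-haddocking | code/ligdist.py | identify_target_ligand
-- ===== SOURCE A (Python) =====
-- def identify_target_ligand(ligand_residues):
--     """Attempts to guess the target ligand"""
--     # If there is only one target ligand then that must be the target
--     # even if there are multiple instances. That could be the case if
--     # the compound is peptidic for example.
--     if len(ligand_residues) == 1:
--         return list(ligand_residues.keys())[0]
--
--     # Alternatively, if there are multiple ligands count them and if
--     # one is found to only have one instance use that after printing
--     # a relevant message
--     indeces = [ligand_residues[_] == 1 for _ in ligand_residues]
--     if indeces.count(True) == 1:
--         index = list(ligand_residues.values()).index(1)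
--         return list(ligand_residues.keys())[index]
--     else:
--         return None
-- ===== SOURCE B (Python) =====
-- def identify_target_ligand(ligand_residues):
--     """Attempts to guess the target ligand"""
--     if len(ligand_residues) == 1:
--         return next(iter(ligand_residues))
--     # single early-exit scan: remember the first key with count 1;
--     # a second such key means the answer is ambiguous -> None immediately
--     candidate = None
--     for k, v in ligand_residues.items():
--         if v == 1:
--             if candidate is not None:
--                 return None
--             candidate = k
--     return candidate
-- ===== Notes on version B (the rewrite author's own statement) =====
-- stated objective: alternative
-- what changed: Replaces A's three staged passes (build a boolean list, count True in it, then re-scan values() with .index and index into keys()) by one early-exit scan with a candidate accumulator: it remembers the first key whose count is 1 and returns None the moment a second such key appears, building no intermediate lists.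
import Mathlib
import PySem

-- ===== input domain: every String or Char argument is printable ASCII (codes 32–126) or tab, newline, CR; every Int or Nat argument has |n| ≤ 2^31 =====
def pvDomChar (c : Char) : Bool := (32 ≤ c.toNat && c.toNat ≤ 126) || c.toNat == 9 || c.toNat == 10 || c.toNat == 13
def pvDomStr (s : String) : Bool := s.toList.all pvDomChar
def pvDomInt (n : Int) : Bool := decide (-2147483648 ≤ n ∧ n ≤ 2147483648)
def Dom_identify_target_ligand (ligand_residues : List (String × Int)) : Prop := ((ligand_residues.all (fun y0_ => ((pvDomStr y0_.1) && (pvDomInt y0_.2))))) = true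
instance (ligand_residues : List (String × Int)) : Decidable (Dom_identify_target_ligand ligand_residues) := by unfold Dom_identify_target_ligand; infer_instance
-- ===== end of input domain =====

-- B replaces A's three staged passes (boolean list, count True, .index re-scan of values/keys)
-- by one early-exit scan with a candidate accumulator; objective: alternative (same O(n) cost).


-- ===== PORT A =====
-- the dict parameter is its association list (unique keys, insertion order);
-- iterating the dict iterates its keys, and d[k] for a key k of the dict is the paired value
def identify_target_ligand (ligand_residues : List (String × Int)) : Option String :=
  if ligand_residues.length = 1 then
    -- list(ligand_residues.keys())[0]; guarded by len == 1 so IndexError is unreachable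
    PySem.List.pyGet? (ligand_residues.map (·.1)) 0
  else
    -- indeces = [ligand_residues[_] == 1 for _ in ligand_residues]
    let indeces := ligand_residues.map (fun p => p.2 == 1)
    if indeces.count true = 1 then
      -- index = list(ligand_residues.values()).index(1)  (ValueError unreachable: count is 1)
      match PySem.List.index? (ligand_residues.map (·.2)) 1 with
      | some index => PySem.List.pyGet? (ligand_residues.map (·.1)) (index : Int)
      | none => none
    else
      none

-- ===== PORT B =====
-- the early-exit loop with the `candidate` accumulator
def itlScan : List (String × Int) → Option String → Option String
  | [], cand => cand
  | (k, v) :: rest, cand =>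
    if v == 1 then
      match cand with
      | some _ => none          -- second single found: return None immediately
      | none => itlScan rest (some k)
    else
      itlScan rest cand

def identify_target_ligand_alt (ligand_residues : List (String × Int)) : Option String :=
  if ligand_residues.length = 1 then
    -- next(iter(ligand_residues)): the first key
    (ligand_residues.map (·.1)).head?
  else
    itlScan ligand_residues none

-- ===== PRECONDITION & SPEC =====
def Spec_identify_target_ligand (ligand_residues : List (String × Int)) (out : Option String) : Prop := out = identify_target_ligand_alt ligand_residues
instance (ligand_residues : List (String × Int)) (out : Option String) : Decidable (Spec_identify_target_ligand ligand_residues out) := by unfold Spec_identify_target_ligand; infer_instance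

-- ===== CLAIM (what is proved, stated in full; the proofs are below) =====
def Claim_equal_identify_target_ligand : Prop := ∀ (ligand_residues : List (String × Int)), Dom_identify_target_ligand ligand_residues → Spec_identify_target_ligand ligand_residues (identify_target_ligand ligand_residues)

-- ===== LEMMAS AND PROOFS =====

-- counting True in A's boolean list counts the pairs with value 1
theorem itl_count (qs : List (String × Int)) :
    (qs.map (fun p => p.2 == 1)).count true = qs.countP (fun p => p.2 == 1) := by
  simp only [List.count_eq_countP, List.countP_map]
  exact List.countP_congr (fun a _ => by simp)

-- once a candidate is held, the scan keeps it iff no further single appears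
theorem itlScan_some (ps : List (String × Int)) (k : String) :
    itlScan ps (some k) = if ps.countP (fun p => p.2 == 1) = 0 then some k else none := by
  induction ps with
  | nil => simp [itlScan]
  | cons p ps ih =>
    obtain ⟨k', v⟩ := p
    by_cases h1 : v = 1
    · subst h1
      simp [itlScan]
    · have hc : (v == (1 : Int)) = false := by simpa using h1
      rw [show itlScan ((k', v) :: ps) (some k) = itlScan ps (some k) from by
            simp [itlScan, hc],
          ih, List.countP_cons]
      simp only [hc, Bool.false_eq_true, if_false, add_zero]

-- the scan from the empty candidate agrees with A's count/.index/keys()[index] stage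
theorem itlScan_none (ps : List (String × Int)) :
    itlScan ps none
      = (if ps.countP (fun p => p.2 == 1) = 1 then
          match PySem.List.index? (ps.map (·.2)) 1 with
          | some index => PySem.List.pyGet? (ps.map (·.1)) (index : Int)
          | none => none
        else none) := by
  induction ps with
  | nil => simp [itlScan]
  | cons p ps ih =>
    obtain ⟨k, v⟩ := p
    by_cases h1 : v = 1
    · subst h1
      simp only [List.map_cons]
      rw [PySem.List.index?_cons_self]
      simp only [itlScan, beq_self_eq_true, if_true, itlScan_some, List.countP_cons]
      by_cases h0 : ps.countP (fun p => p.2 == 1) = 0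
      · simp [h0]
      · simp [h0]
    · have hc : (v == (1 : Int)) = false := by simpa using h1
      simp only [List.map_cons]
      rw [show PySem.List.index? ((v : Int) :: ps.map (·.2)) 1
            = (PySem.List.index? (ps.map (·.2)) 1).map (· + 1) from
          PySem.List.index?_cons_of_ne _ (by simpa using h1)]
      simp only [itlScan, hc, Bool.false_eq_true, if_false, List.countP_cons, add_zero, ih]
      rcases hix : PySem.List.index? (ps.map (·.2)) 1 with _ | i <;>
        rw [PySem.List.index?_eq_idxOf?] at hix
      · simp [hix]
      · simp [hix, PySem.List.pyGet?_natCast]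

-- ===== VERDICT (by name: the statement is the Claim_ definition above) =====
theorem identify_target_ligand_spec : Claim_equal_identify_target_ligand := by
  unfold Claim_equal_identify_target_ligand
  intro ps _
  unfold Spec_identify_target_ligand identify_target_ligand identify_target_ligand_alt
  by_cases hl : ps.length = 1
  · match ps, hl with
    | [p], _ => simp
  · simp only [hl, if_false, itl_count]
    exact (itlScan_none ps).symm
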